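-- pv_equiv track=rewrite | github.com/waynesankey/pre1_sw | main.py | _next_uart_cmd_index
-- ===== SOURCE A (Python) =====
-- def _next_uart_cmd_index(text, start):
--     markers = ("GET ", "SET ", "ADD ", "DEL ")
--     found = -1
--     for marker in markers:
--         idx = text.find(marker, start)
--         if idx >= 0 and (found < 0 or idx < found):
--             found = idx
--     return found
-- ===== SOURCE B (Python) =====
-- import re
--
-- _CMD_RE = re.compile("GET |SET |ADD |DEL ")
--
--
-- def _next_uart_cmd_index(text, start):
--     m = _CMD_RE.search(text, start)
--     return m.start() if m else -1
-- ===== Notes on version B (the rewrite author's own statement) =====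
-- stated objective: idiomatic
-- what changed: Replaces four str.find scans plus a running-minimum with one precompiled regex alternation whose leftmost match is the answer; Pre_ excludes negative start, where str.find's slice-style wraparound and re.search's clamp-to-0 are both defensible readings of an unspecified corner.
-- outside the precondition, e.g. on _next_uart_cmd_index('GET x GET y', -5): A returns 6, B returns 0
import Mathlib
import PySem

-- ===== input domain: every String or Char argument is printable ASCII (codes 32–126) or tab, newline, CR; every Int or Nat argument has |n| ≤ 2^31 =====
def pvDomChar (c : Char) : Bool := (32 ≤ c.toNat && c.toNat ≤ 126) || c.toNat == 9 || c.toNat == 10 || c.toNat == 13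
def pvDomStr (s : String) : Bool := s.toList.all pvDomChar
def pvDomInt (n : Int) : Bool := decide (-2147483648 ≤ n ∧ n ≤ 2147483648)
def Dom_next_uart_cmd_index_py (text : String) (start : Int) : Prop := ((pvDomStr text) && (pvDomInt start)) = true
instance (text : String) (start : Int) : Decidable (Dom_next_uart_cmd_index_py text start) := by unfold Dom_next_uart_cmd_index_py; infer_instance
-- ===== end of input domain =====

-- B replaces A's four str.find passes plus a running minimum with a single alternation scan (a precompiled regex in Python); idiomatic, same result on Pre_.

-- ===== PORT A =====
def next_uart_cmd_index_py (text : String) (start : Int) : Int :=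
  let markers : List String := ["GET ", "SET ", "ADD ", "DEL "]
  markers.foldl (fun found marker =>
    let idx := PySem.Str.findFrom text marker start
    if 0 ≤ idx ∧ (found < 0 ∨ idx < found) then idx else found) (-1)

-- ===== PORT B =====
-- The regex alternation of the four LITERAL markers is ported by hand, exactly as it
-- matches: scan positions left to right from the search position, return the first
-- position at which some marker is a prefix (re's leftmost-match rule for literal
-- alternatives), else -1.
def pvAltMatch (t : List Char) : Bool :=
  ["GET ".toList, "SET ".toList, "ADD ".toList, "DEL ".toList].any (fun m => m.isPrefixOf t)

def pvAltSearch : List Char → Nat → Int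
  | [], _ => -1
  | c :: rest, i => if pvAltMatch (c :: rest) then (i : Int) else pvAltSearch rest (i + 1)

-- CPython's re.search(text, pos) clamps a negative pos to 0; Int.toNat does exactly that.
def next_uart_cmd_index_py_alt (text : String) (start : Int) : Int :=
  pvAltSearch (text.toList.drop start.toNat) start.toNat

-- ===== PRECONDITION & SPEC =====
-- Pre_ excludes negative start, where str.find's slice-style wraparound (A) and
-- re.search's clamp-to-0 (B) are both defensible readings of an unspecified corner.
def Pre_next_uart_cmd_index_py (text : String) (start : Int) : Prop := 0 ≤ start
instance (text : String) (start : Int) : Decidable (Pre_next_uart_cmd_index_py text start) := by unfold Pre_next_uart_cmd_index_py; infer_instance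
def pvWitness_next_uart_cmd_index_py : String × Int := ("x GET a", 0)
def Spec_next_uart_cmd_index_py (text : String) (start : Int) (out : Int) : Prop := out = next_uart_cmd_index_py_alt text start
instance (text : String) (start : Int) (out : Int) : Decidable (Spec_next_uart_cmd_index_py text start out) := by unfold Spec_next_uart_cmd_index_py; infer_instance

-- ===== CLAIM (what is proved, stated in full; the proofs are below) =====
def Claim_equal_next_uart_cmd_index_py : Prop := ∀ (text : String) (start : Int), Dom_next_uart_cmd_index_py text start → Pre_next_uart_cmd_index_py text start → Spec_next_uart_cmd_index_py text start (next_uart_cmd_index_py text start)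

-- ===== LEMMAS AND PROOFS =====

-- A's loop step, abstracted over the already-computed find result
def pvStep (found v : Int) : Int := if 0 ≤ v ∧ (found < 0 ∨ v < found) then v else found

-- first index (into t) at which some marker matches, if any
def pvFirstIdx : List Char → Option Nat
  | [] => none
  | c :: rest => if pvAltMatch (c :: rest) then some 0 else (pvFirstIdx rest).map (· + 1)

lemma pvAltSearch_eq (t : List Char) (i : Nat) :
    pvAltSearch t i = (pvFirstIdx t).elim (-1) (fun j => (i : Int) + (j : Int)) := by
  induction t generalizing i with
  | nil => simp [pvAltSearch, pvFirstIdx]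
  | cons c rest ih =>
    simp only [pvAltSearch, pvFirstIdx]
    by_cases h : pvAltMatch (c :: rest) = true
    · simp [h]
    · simp only [h, if_neg, Bool.not_eq_true] at *
      rw [ih]
      cases pvFirstIdx rest <;> simp <;> try omega

lemma pvFirstIdx_none {t : List Char} (h : pvFirstIdx t = none) :
    ∀ j, pvAltMatch (t.drop j) = false := by
  induction t with
  | nil => intro j; rw [List.drop_nil]; decide
  | cons c rest ih =>
    intro j
    simp only [pvFirstIdx] at h
    by_cases hm : pvAltMatch (c :: rest) = true
    · simp [hm] at h
    · cases j with
      | zero => simpa using hm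
      | succ j =>
        simp only [hm, if_neg, Bool.not_eq_true, Option.map_eq_none_iff] at h
        exact ih (by simpa using h) j

lemma pvFirstIdx_some {t : List Char} {j : Nat} (h : pvFirstIdx t = some j) :
    pvAltMatch (t.drop j) = true ∧ ∀ j' < j, pvAltMatch (t.drop j') = false := by
  induction t generalizing j with
  | nil => simp [pvFirstIdx] at h
  | cons c rest ih =>
    simp only [pvFirstIdx] at h
    by_cases hm : pvAltMatch (c :: rest) = true
    · simp only [hm, if_pos] at h
      cases h
      exact ⟨hm, by omega⟩
    · simp only [hm, if_neg, Bool.not_eq_true] at h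
      rcases Option.map_eq_some_iff.mp h with ⟨j₀, hj₀, rfl⟩
      obtain ⟨h1, h2⟩ := ih hj₀
      refine ⟨by simpa using h1, ?_⟩
      intro j' hj'
      cases j' with
      | zero => simpa using hm
      | succ j' => simpa using h2 j' (by omega)

lemma pvAltMatch_of_prefix {m t : List Char}
    (hm : m ∈ ["GET ".toList, "SET ".toList, "ADD ".toList, "DEL ".toList])
    (hp : m <+: t) : pvAltMatch t = true := by
  simp only [pvAltMatch, List.any_eq_true]
  exact ⟨m, hm, List.isPrefixOf_iff_prefix.mpr hp⟩

lemma pvPrefix_of_match {t : List Char} (h : pvAltMatch t = true) :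
    ∃ m ∈ ["GET ".toList, "SET ".toList, "ADD ".toList, "DEL ".toList], m <+: t := by
  simp only [pvAltMatch, List.any_eq_true] at h
  rcases h with ⟨m, hm, hp⟩
  exact ⟨m, hm, List.isPrefixOf_iff_prefix.mp hp⟩

-- if no position matches, each marker's find is -1
lemma pvFind_of_none {t m : List Char}
    (hm : m ∈ ["GET ".toList, "SET ".toList, "ADD ".toList, "DEL ".toList])
    (h : ∀ j, pvAltMatch (t.drop j) = false) : PySem.Chars.find t m = -1 := by
  by_contra hne
  have h0 : 0 ≤ PySem.Chars.find t m := by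
    have := PySem.Chars.neg_one_le_find t m; omega
  have hsp := (PySem.Chars.find_spec h0).1
  have := pvAltMatch_of_prefix hm hsp
  rw [h _] at this; exact Bool.false_ne_true this

-- if no position before j matches, each marker's find is -1 or ≥ j
lemma pvFind_ge {t m : List Char} {j : Nat}
    (hm : m ∈ ["GET ".toList, "SET ".toList, "ADD ".toList, "DEL ".toList])
    (hmin : ∀ j' < j, pvAltMatch (t.drop j') = false) :
    PySem.Chars.find t m = -1 ∨ (j : Int) ≤ PySem.Chars.find t m := by
  by_cases hne : PySem.Chars.find t m = -1
  · exact Or.inl hne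
  · right
    have h0 : 0 ≤ PySem.Chars.find t m := by
      have := PySem.Chars.neg_one_le_find t m; omega
    have hsp := (PySem.Chars.find_spec h0).1
    by_contra hlt
    have hjn : (PySem.Chars.find t m).toNat < j := by omega
    have := pvAltMatch_of_prefix hm hsp
    rw [hmin _ hjn] at this; exact Bool.false_ne_true this

-- if j is the first matching position, some marker's find is exactly j
lemma pvFind_exists {t : List Char} {j : Nat}
    (hj : pvAltMatch (t.drop j) = true) (hmin : ∀ j' < j, pvAltMatch (t.drop j') = false) :
    ∃ m ∈ ["GET ".toList, "SET ".toList, "ADD ".toList, "DEL ".toList],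
      PySem.Chars.find t m = (j : Int) := by
  rcases pvPrefix_of_match hj with ⟨m, hm, hp⟩
  refine ⟨m, hm, ?_⟩
  have hin : PySem.Chars.isIn m t = true :=
    (PySem.Chars.exists_prefix_drop_iff_isIn m t).mp ⟨j, hp⟩
  have hne : PySem.Chars.find t m ≠ -1 := by
    intro hc
    rw [PySem.Chars.find_eq_neg_one_iff] at hc
    exact hc ((PySem.Chars.isIn_iff_infix m t).mp hin)
  have h0 : 0 ≤ PySem.Chars.find t m := by
    have := PySem.Chars.neg_one_le_find t m; omega
  obtain ⟨hpref, hminf⟩ := PySem.Chars.find_spec h0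
  have hle : (PySem.Chars.find t m).toNat ≤ j := by
    by_contra hgt
    exact hminf j (by omega) hp
  rcases pvFind_ge hm hmin with hc | hge
  · exact absurd hc hne
  · omega

-- A's findFrom, for a nonempty needle and nonnegative start, in terms of find on the dropped suffix
lemma pvFindFrom_nonneg (s m : List Char) (hm : m ≠ []) (start : Int) (h0 : 0 ≤ start) :
    PySem.Chars.findFrom s m start none =
      (if PySem.Chars.find (s.drop start.toNat) m = -1 then -1
       else (start.toNat : Int) + PySem.Chars.find (s.drop start.toNat) m) := by
  have hfindnil : PySem.Chars.find ([] : List Char) m = -1 := by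
    rw [PySem.Chars.find_eq_neg_one_iff]
    intro hc
    exact hm (List.eq_nil_of_infix_nil hc)
  simp only [PySem.Chars.findFrom]
  have hst : (if start < 0 then if start + (s.length : Int) < 0 then 0 else start + (s.length : Int) else start) = start := by
    split_ifs <;> omega
  rw [hst, Int.toNat_natCast, List.take_length]
  by_cases hb : (s.length : Int) < start
  · rw [if_pos hb]
    have hdrop : s.drop start.toNat = [] := List.drop_eq_nil_of_le (by omega)
    rw [hdrop, hfindnil, if_pos rfl]
  · rw [if_neg hb, Int.toNat_of_nonneg h0]

-- the running-minimum combination of four find results equals the first-match value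
lemma pvCombine (v1 v2 v3 v4 r : Int)
    (h1 : v1 = -1 ∨ r ≤ v1) (h2 : v2 = -1 ∨ r ≤ v2)
    (h3 : v3 = -1 ∨ r ≤ v3) (h4 : v4 = -1 ∨ r ≤ v4)
    (hr : 0 ≤ r) (hex : v1 = r ∨ v2 = r ∨ v3 = r ∨ v4 = r) :
    pvStep (pvStep (pvStep (pvStep (-1) v1) v2) v3) v4 = r := by
  unfold pvStep
  split_ifs <;> omega

lemma pvCombine_none : pvStep (pvStep (pvStep (pvStep (-1) (-1)) (-1)) (-1)) (-1) = -1 := by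
  decide

-- ===== VERDICT (by name: the statement is the Claim_ definition above) =====
theorem next_uart_cmd_index_py_spec : Claim_equal_next_uart_cmd_index_py := by
  intro text start _ hpre
  unfold Spec_next_uart_cmd_index_py
  have h0 : (0:Int) ≤ start := hpre
  have hA : next_uart_cmd_index_py text start =
      pvStep (pvStep (pvStep (pvStep (-1)
        (PySem.Str.findFrom text "GET " start))
        (PySem.Str.findFrom text "SET " start))
        (PySem.Str.findFrom text "ADD " start))
        (PySem.Str.findFrom text "DEL " start) := rfl
  have hB : next_uart_cmd_index_py_alt text start =
      pvAltSearch (text.toList.drop start.toNat) start.toNat := rfl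
  rw [hA, hB, pvAltSearch_eq]
  rw [PySem.Str.findFrom_eq, PySem.Str.findFrom_eq, PySem.Str.findFrom_eq, PySem.Str.findFrom_eq]
  rw [pvFindFrom_nonneg text.toList ("GET ".toList) (by decide) start h0,
      pvFindFrom_nonneg text.toList ("SET ".toList) (by decide) start h0,
      pvFindFrom_nonneg text.toList ("ADD ".toList) (by decide) start h0,
      pvFindFrom_nonneg text.toList ("DEL ".toList) (by decide) start h0]
  set t : List Char := text.toList.drop start.toNat with ht
  set i : Nat := start.toNat with hi
  have hG : ("GET ".toList) ∈ ["GET ".toList, "SET ".toList, "ADD ".toList, "DEL ".toList] := by decide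
  have hS : ("SET ".toList) ∈ ["GET ".toList, "SET ".toList, "ADD ".toList, "DEL ".toList] := by decide
  have hAm : ("ADD ".toList) ∈ ["GET ".toList, "SET ".toList, "ADD ".toList, "DEL ".toList] := by decide
  have hD : ("DEL ".toList) ∈ ["GET ".toList, "SET ".toList, "ADD ".toList, "DEL ".toList] := by decide
  rcases hfi : pvFirstIdx t with _ | j
  · have h := pvFirstIdx_none hfi
    rw [pvFind_of_none hG h, pvFind_of_none hS h, pvFind_of_none hAm h, pvFind_of_none hD h]
    simp only [Option.elim]
    exact pvCombine_none
  · obtain ⟨hj, hmin⟩ := pvFirstIdx_some hfi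
    simp only [Option.elim]
    have key : ∀ m ∈ ["GET ".toList, "SET ".toList, "ADD ".toList, "DEL ".toList],
        (if PySem.Chars.find t m = -1 then -1 else (i : Int) + PySem.Chars.find t m) = -1 ∨
        ((i : Int) + (j : Int)) ≤ (if PySem.Chars.find t m = -1 then -1 else (i : Int) + PySem.Chars.find t m) := by
      intro m hm
      rcases pvFind_ge hm hmin with h | h
      · left; rw [if_pos h]
      · right; rw [if_neg (by omega)]; omega
    have hex : (if PySem.Chars.find t ("GET ".toList) = -1 then -1 else (i : Int) + PySem.Chars.find t ("GET ".toList)) = (i : Int) + (j : Int) ∨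
        (if PySem.Chars.find t ("SET ".toList) = -1 then -1 else (i : Int) + PySem.Chars.find t ("SET ".toList)) = (i : Int) + (j : Int) ∨
        (if PySem.Chars.find t ("ADD ".toList) = -1 then -1 else (i : Int) + PySem.Chars.find t ("ADD ".toList)) = (i : Int) + (j : Int) ∨
        (if PySem.Chars.find t ("DEL ".toList) = -1 then -1 else (i : Int) + PySem.Chars.find t ("DEL ".toList)) = (i : Int) + (j : Int) := by
      rcases pvFind_exists hj hmin with ⟨m, hm, hfm⟩
      have hval : (if PySem.Chars.find t m = -1 then -1 else (i : Int) + PySem.Chars.find t m) = (i : Int) + (j : Int) := by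
        rw [if_neg (by omega), hfm]
      simp only [List.mem_cons, List.not_mem_nil, or_false] at hm
      rcases hm with rfl | rfl | rfl | rfl
      · exact Or.inl hval
      · exact Or.inr (Or.inl hval)
      · exact Or.inr (Or.inr (Or.inl hval))
      · exact Or.inr (Or.inr (Or.inr hval))
    exact pvCombine _ _ _ _ _ (key _ hG) (key _ hS) (key _ hAm) (key _ hD) (by positivity) hex
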